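-- pv_equiv track=rewrite | github.com/pombredanne/pynlpl | textprocessors.py | crude_tokenizer
-- ===== SOURCE A (Python) =====
-- import string
--
-- def crude_tokenizer(line):
--     """This is a very crude tokenizer"""
--     tokens = []
--     buffer = ''
--     for c in line.strip():
--         if c == ' ' or c in string.punctuation:
--             if buffer:
--                 tokens.append(buffer)
--                 buffer = ''
--         else:
--             buffer += c
--     if buffer: tokens.append(buffer)
--     return tokens
-- ===== SOURCE B (Python) =====
-- import string
-- import re
--
-- _TOKEN_RE = re.compile('[^' + re.escape(' ' + string.punctuation) + ']+')
--
-- def crude_tokenizer(line):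
--     """This is a very crude tokenizer"""
--     return _TOKEN_RE.findall(line.strip())
-- ===== Notes on version B (the rewrite author's own statement) =====
-- stated objective: idiomatic
-- what changed: Replaced the manual per-character loop with a mutable string buffer by a single precompiled regex findall of maximal runs of non-delimiter characters over line.strip().
import Mathlib
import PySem

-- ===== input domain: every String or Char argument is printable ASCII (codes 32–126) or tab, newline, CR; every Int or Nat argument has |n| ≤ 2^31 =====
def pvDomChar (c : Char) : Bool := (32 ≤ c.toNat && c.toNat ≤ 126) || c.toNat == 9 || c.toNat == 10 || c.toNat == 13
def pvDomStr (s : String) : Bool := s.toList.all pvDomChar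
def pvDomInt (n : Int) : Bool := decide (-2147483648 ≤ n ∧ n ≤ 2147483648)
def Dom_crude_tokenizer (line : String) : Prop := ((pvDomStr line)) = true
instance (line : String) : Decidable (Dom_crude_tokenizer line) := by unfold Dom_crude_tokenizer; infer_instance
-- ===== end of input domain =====

-- B replaces A's manual per-character loop and buffer by one regex findall of maximal
-- non-delimiter runs over the stripped line (objective: idiomatic; return value only).

-- string.punctuation (shared constant of the module)
def pvPunct : List Char := "!\"#$%&'()*+,-./:;<=>?@[\\]^_`{|}~".toList

-- ===== PORT A =====
-- the body of A's for-loop, on the state (tokens, buffer)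
def pvStepA (acc : List String × List Char) (c : Char) : List String × List Char :=
  if c == ' ' || pvPunct.contains c then
    if acc.2 ≠ [] then (acc.1 ++ [String.ofList acc.2], []) else acc
  else (acc.1, acc.2 ++ [c])

def crude_tokenizer (line : String) : List String :=
  let st := (PySem.Chars.strip line.toList).foldl pvStepA ([], [])
  if st.2 ≠ [] then st.1 ++ [String.ofList st.2] else st.1

-- ===== PORT B =====
-- the delimiter class [^ <space+punctuation>]
def pvIsDelim (c : Char) : Bool := c == ' ' || pvPunct.contains c

-- re.findall('[^D]+', s): skip delimiters, take each maximal run of non-delimiters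
def pvFindall : List Char → List (List Char)
  | [] => []
  | c :: rest =>
    if pvIsDelim c then pvFindall rest
    else (c :: rest.takeWhile (fun d => !pvIsDelim d)) ::
         pvFindall (rest.dropWhile (fun d => !pvIsDelim d))
termination_by cs => cs.length
decreasing_by
  · simp
  · simpa using Nat.lt_succ_of_le (List.length_dropWhile_le (fun d => !pvIsDelim d) rest)

def crude_tokenizer_alt (line : String) : List String :=
  (pvFindall (PySem.Chars.strip line.toList)).map String.ofList

-- ===== PRECONDITION & SPEC =====
def Spec_crude_tokenizer (line : String) (out : List String) : Prop := out = crude_tokenizer_alt line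
instance (line : String) (out : List String) : Decidable (Spec_crude_tokenizer line out) := by unfold Spec_crude_tokenizer; infer_instance

-- ===== CLAIM (what is proved, stated in full; the proofs are below) =====
def Claim_equal_crude_tokenizer : Prop := ∀ (line : String), Dom_crude_tokenizer line → Spec_crude_tokenizer line (crude_tokenizer line)

-- ===== LEMMAS AND PROOFS =====

theorem pvStepA_delim_nil {c : Char} (h : pvIsDelim c = true) (tokens : List String) :
    pvStepA (tokens, []) c = (tokens, []) := by
  unfold pvStepA
  unfold pvIsDelim at h
  rw [if_pos h]
  simp

theorem pvStepA_delim_ne {c : Char} (h : pvIsDelim c = true) (tokens : List String)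
    {buf : List Char} (hb : buf ≠ []) :
    pvStepA (tokens, buf) c = (tokens ++ [String.ofList buf], []) := by
  unfold pvStepA
  unfold pvIsDelim at h
  rw [if_pos h, if_pos hb]

theorem pvStepA_keep {c : Char} (h : pvIsDelim c = false) (tokens : List String)
    (buf : List Char) :
    pvStepA (tokens, buf) c = (tokens, buf ++ [c]) := by
  unfold pvStepA
  unfold pvIsDelim at h
  rw [if_neg (by rw [h]; exact Bool.false_ne_true)]

-- A's loop, from any state (tokens, buf), finishes as tokens ++ the findall groups,
-- the first group being extended by the pending buffer.
theorem pvLoop_eq (cs : List Char) : ∀ (tokens : List String) (buf : List Char),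
    (let st := cs.foldl pvStepA (tokens, buf)
     if st.2 ≠ [] then st.1 ++ [String.ofList st.2] else st.1)
    = tokens ++ (if buf = [] then (pvFindall cs).map String.ofList
                 else String.ofList (buf ++ cs.takeWhile (fun d => !pvIsDelim d)) ::
                      (pvFindall (cs.dropWhile (fun d => !pvIsDelim d))).map String.ofList) := by
  induction cs with
  | nil =>
    intro tokens buf
    by_cases h : buf = [] <;> simp [h, pvFindall]
  | cons c rest ih =>
    intro tokens buf
    by_cases hd : pvIsDelim c
    · by_cases hb : buf = []
      · subst hb
        rw [List.foldl_cons, pvStepA_delim_nil hd, ih]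
        simp [pvFindall, hd]
      · rw [List.foldl_cons, pvStepA_delim_ne hd tokens hb, ih]
        simp [hb, hd, pvFindall]
    · have hd' : pvIsDelim c = false := by simpa using hd
      rw [List.foldl_cons, pvStepA_keep hd', ih]
      by_cases hb : buf = []
      · simp [hb, pvFindall, hd']
      · simp [hb, hd']

-- ===== VERDICT (by name: the statement is the Claim_ definition above) =====
theorem crude_tokenizer_spec : Claim_equal_crude_tokenizer := by
  intro line _
  unfold Spec_crude_tokenizer crude_tokenizer crude_tokenizer_alt
  simpa using pvLoop_eq (PySem.Chars.strip line.toList) [] []
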